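-- pv_equiv track=rewrite | github.com/shivammehta25/Fun-Coding | AdventOfCode2025/Day9/solution.py | find_suitable_dots_itr
-- ===== SOURCE A (Python) =====
-- def find_suitable_dots_itr(arr_new, curr_r_count):
--     n = len(arr_new)
--     curr_dots = 0
--     for i in range(n + 1):
--         if i == n:
--             break
--
--         if arr_new[i] != ".":
--             if curr_dots >= curr_r_count:
--                 break
--             else:
--                 curr_dots = 0
--                 continue
--         curr_dots += 1
--     return i - curr_dots
-- ===== SOURCE B (Python) =====
-- def find_suitable_dots_itr(arr_new, curr_r_count):
--     # Two-phase: build the list of maximal dot-runs, then scan it.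
--     if curr_r_count <= 0:
--         return 0
--     n = len(arr_new)
--     runs = []  # (start, length) of each maximal run of "." elements
--     i = 0
--     while i < n:
--         if arr_new[i] != ".":
--             i += 1
--             continue
--         j = i
--         while j < n and arr_new[j] == ".":
--             j += 1
--         runs.append((i, j - i))
--         i = j
--     for start, length in runs:
--         if start + length < n and length >= curr_r_count:
--             return start
--     if runs and runs[-1][0] + runs[-1][1] == n:
--         return runs[-1][0]
--     return n
-- ===== Notes on version B (the rewrite author's own statement) =====
-- stated objective: alternative
-- what changed: B replaces A's single stateful loop (running dot counter with break/continue) by a two-phase decomposition: one pass builds the list of maximal dot-runs as (start, length) pairs, then a scan of that run list picks the first run that is followed by a non-dot and long enough, falling back to the trailing run or n; curr_r_count <= 0 is handled by an up-front return 0.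
import Mathlib
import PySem

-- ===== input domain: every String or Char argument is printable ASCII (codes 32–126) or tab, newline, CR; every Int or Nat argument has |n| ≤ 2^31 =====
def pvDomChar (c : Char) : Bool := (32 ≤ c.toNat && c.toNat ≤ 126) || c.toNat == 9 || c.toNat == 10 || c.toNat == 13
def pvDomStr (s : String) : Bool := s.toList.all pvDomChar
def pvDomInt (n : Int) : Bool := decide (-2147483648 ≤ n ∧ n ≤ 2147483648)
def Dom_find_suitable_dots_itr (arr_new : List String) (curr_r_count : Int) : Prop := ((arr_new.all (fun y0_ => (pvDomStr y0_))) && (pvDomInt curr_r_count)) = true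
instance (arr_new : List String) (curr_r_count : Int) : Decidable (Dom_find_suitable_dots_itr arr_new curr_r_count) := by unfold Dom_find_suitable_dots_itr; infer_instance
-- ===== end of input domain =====

-- B rebuilds A's stateful scan as a two-phase pass (collect maximal dot-runs, then scan the run list); same O(n) cost, different decomposition.


-- ===== PORT A =====
-- A's for-loop: state (i, curr_dots); break at i == n returns i - curr_dots,
-- break at a non-dot with curr_dots >= curr_r_count returns i - curr_dots.
def pvLoopA (c : Int) : List String → Nat → Nat → Int
  | [], i, curr => (i : Int) - (curr : Int)
  | s :: rest, i, curr =>
    if s ≠ "." then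
      if (curr : Int) ≥ c then (i : Int) - (curr : Int)
      else pvLoopA c rest (i + 1) 0
    else pvLoopA c rest (i + 1) (curr + 1)

def find_suitable_dots_itr (arr_new : List String) (curr_r_count : Int) : Int :=
  pvLoopA curr_r_count arr_new 0 0

-- ===== PORT B =====
-- inner `while j < n and arr_new[j] == "."`: number of leading dots
def pvCountDots : List String → Nat
  | [] => 0
  | s :: rest => if s = "." then pvCountDots rest + 1 else 0

theorem pvCountDots_pos (s : String) (rest : List String) (h : s = ".") :
    1 ≤ pvCountDots (s :: rest) := by simp [pvCountDots, h]

theorem pvCountDots_le_length : ∀ (l : List String), pvCountDots l ≤ l.length := by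
  intro l
  induction l with
  | nil => simp [pvCountDots]
  | cons s rest ih => by_cases hs : s = "." <;> simp [pvCountDots, hs]
                      omega

-- outer while loop building the (start, length) run list
def pvRunsAt : List String → Nat → List (Nat × Nat)
  | [], _ => []
  | s :: rest, i =>
    if h : s = "." then
      (i, pvCountDots (s :: rest)) ::
        pvRunsAt ((s :: rest).drop (pvCountDots (s :: rest))) (i + pvCountDots (s :: rest))
    else
      pvRunsAt rest (i + 1)
termination_by l _ => l.length
decreasing_by
  · have h1 := pvCountDots_pos s rest h
    have h2 := pvCountDots_le_length (s :: rest)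
    simp only [List.length_drop]
    omega
  · simp

-- the scan `for start, length in runs: ...`
def pvFindRun (n : Nat) (c : Int) : List (Nat × Nat) → Option Int
  | [] => none
  | (s, l) :: rest =>
    if s + l < n ∧ (l : Int) ≥ c then some (s : Int) else pvFindRun n c rest

def find_suitable_dots_itr_alt (arr_new : List String) (curr_r_count : Int) : Int :=
  if curr_r_count ≤ 0 then 0
  else
    let n := arr_new.length
    let runs := pvRunsAt arr_new 0
    match pvFindRun n curr_r_count runs with
    | some s => s
    | none =>
      match runs.getLast? with
      | some (s, l) => if s + l = n then (s : Int) else (n : Int)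
      | none => (n : Int)

-- ===== PRECONDITION & SPEC =====
def Spec_find_suitable_dots_itr (arr_new : List String) (curr_r_count : Int) (out : Int) : Prop := out = find_suitable_dots_itr_alt arr_new curr_r_count
instance (arr_new : List String) (curr_r_count : Int) (out : Int) : Decidable (Spec_find_suitable_dots_itr arr_new curr_r_count out) := by unfold Spec_find_suitable_dots_itr; infer_instance

-- ===== CLAIM (what is proved, stated in full; the proofs are below) =====
def Claim_equal_find_suitable_dots_itr : Prop := ∀ (arr_new : List String) (curr_r_count : Int), Dom_find_suitable_dots_itr arr_new curr_r_count → Spec_find_suitable_dots_itr arr_new curr_r_count (find_suitable_dots_itr arr_new curr_r_count)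

-- ===== LEMMAS AND PROOFS =====

-- B's whole scan phase, as one function of the run list (proof-side abbreviation).
def pvScanB (n : Nat) (c : Int) (runs : List (Nat × Nat)) : Int :=
  match pvFindRun n c runs with
  | some s => s
  | none =>
    match runs.getLast? with
    | some (s, l) => if s + l = n then (s : Int) else (n : Int)
    | none => (n : Int)

theorem pvLoopA_nonpos (c : Int) (hc : c ≤ 0) :
    ∀ (l : List String) (i curr : Nat), pvLoopA c l i curr = (i : Int) - (curr : Int) := by
  intro l
  induction l with
  | nil => intro i curr; simp [pvLoopA]
  | cons s rest ih =>
    intro i curr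
    by_cases hs : s = "."
    · simp [pvLoopA, hs, ih]
    · have : (curr : Int) ≥ c := le_trans hc (by positivity)
      simp [pvLoopA, hs, this]

-- the element right after the leading dot-run (if any) is not a dot
theorem pvCountDots_drop : ∀ (l : List String),
    l.drop (pvCountDots l) = [] ∨
    ∃ x rest, l.drop (pvCountDots l) = x :: rest ∧ x ≠ "." := by
  intro l
  induction l with
  | nil => left; simp
  | cons s rest ih =>
    by_cases hs : s = "."
    · simpa [pvCountDots, hs] using ih
    · right; exact ⟨s, rest, by simp [pvCountDots, hs], hs⟩

-- A's loop, run across the leading dot-run in one step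
theorem pvLoopA_dots (c : Int) : ∀ (l : List String) (i curr : Nat),
    pvLoopA c l i curr =
      match l.drop (pvCountDots l) with
      | [] => (i : Int) - (curr : Int)
      | _ :: rest =>
        if (curr : Int) + (pvCountDots l : Int) ≥ c then (i : Int) - (curr : Int)
        else pvLoopA c rest (i + pvCountDots l + 1) 0 := by
  intro l
  induction l with
  | nil => intro i curr; simp [pvLoopA, pvCountDots]
  | cons s rest ih =>
    intro i curr
    by_cases hs : s = "."
    · have h1 : pvLoopA c (s :: rest) i curr = pvLoopA c rest (i + 1) (curr + 1) := by
        simp [pvLoopA, hs]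
      rw [h1, ih]
      have h2 : pvCountDots (s :: rest) = pvCountDots rest + 1 := by simp [pvCountDots, hs]
      cases hdr : rest.drop (pvCountDots rest) with
      | nil => simp [h2, hdr]
      | cons x rest2 =>
        simp only [h2, List.drop_succ_cons, hdr]
        have harith : (curr : Int) + 1 + (pvCountDots rest : Int) =
            (curr : Int) + ((pvCountDots rest : Int) + 1) := by ring
        have hidx : i + 1 + pvCountDots rest + 1 = i + (pvCountDots rest + 1) + 1 := by omega
        push_cast
        rw [harith, hidx]
        split_ifs with hge
        · ring
        · rfl
    · have h2 : pvCountDots (s :: rest) = 0 := by simp [pvCountDots, hs]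
      simp only [h2, List.drop_zero]
      simp [pvLoopA, hs]

theorem pvScanB_cons (n : Nat) (c : Int) (s l : Nat) (tail : List (Nat × Nat))
    (h : s + l < n) :
    pvScanB n c ((s, l) :: tail) =
      if (l : Int) ≥ c then (s : Int) else pvScanB n c tail := by
  by_cases hge : (l : Int) ≥ c
  · simp [pvScanB, pvFindRun, h, hge]
  · have hfr : pvFindRun n c ((s, l) :: tail) = pvFindRun n c tail := by
      simp [pvFindRun, hge]
    cases tail with
    | nil =>
      have : ¬ (s + l = n) := by omega
      simp [pvScanB, pvFindRun, hge, this]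
    | cons p tl =>
      simp only [pvScanB, hfr, hge, List.getLast?_cons_cons, if_false]

-- main bridge: A's loop from a clean state equals B's scan of the run list of the suffix
theorem pvMain (c : Int) (hc : 0 < c) :
    ∀ (N : Nat) (l : List String) (i : Nat), l.length ≤ N →
      pvLoopA c l i 0 = pvScanB (i + l.length) c (pvRunsAt l i) := by
  intro N
  induction N with
  | zero =>
    intro l i hl
    have : l = [] := List.length_eq_zero_iff.mp (Nat.le_zero.mp hl)
    subst this
    simp [pvLoopA, pvRunsAt, pvScanB, pvFindRun]
  | succ N ih =>
    intro l i hl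
    cases l with
    | nil => simp [pvLoopA, pvRunsAt, pvScanB, pvFindRun]
    | cons s rest =>
      by_cases hs : s = "."
      · subst hs
        have hk1 : 1 ≤ pvCountDots ("." :: rest) := pvCountDots_pos _ rest rfl
        have hkle := pvCountDots_le_length ("." :: rest)
        have hruns : pvRunsAt ("." :: rest) i =
            (i, pvCountDots ("." :: rest)) ::
              pvRunsAt (("." :: rest).drop (pvCountDots ("." :: rest)))
                (i + pvCountDots ("." :: rest)) := by
          rw [pvRunsAt]; simp
        rcases pvCountDots_drop ("." :: rest) with hnil | ⟨x, rest2, hdrop, hx⟩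
        · -- the whole suffix is one trailing dot-run
          have hklen : pvCountDots ("." :: rest) = ("." :: rest).length := by
            have := List.drop_eq_nil_iff.mp hnil
            omega
          rw [pvLoopA_dots c ("." :: rest) i 0]
          rw [hruns, hnil]
          simp only [pvRunsAt]
          rw [show ("." :: rest).length = pvCountDots ("." :: rest) from hklen.symm]
          simp [pvScanB, pvFindRun]
        · -- the run is followed by the non-dot x
          have hlen : ("." :: rest).length = pvCountDots ("." :: rest) + 1 + rest2.length := by
            have hcd := congrArg List.length hdrop
            rw [List.length_drop] at hcd
            simp only [List.length_cons] at hcd ⊢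
            generalize hg : pvCountDots ("." :: rest) = k at hcd ⊢
            omega
          have htail : pvRunsAt (("." :: rest).drop (pvCountDots ("." :: rest)))
              (i + pvCountDots ("." :: rest)) =
              pvRunsAt rest2 (i + pvCountDots ("." :: rest) + 1) := by
            rw [hdrop, pvRunsAt]; simp [hx]
          rw [pvLoopA_dots c ("." :: rest) i 0]
          rw [hruns, htail]
          simp only [hdrop]
          have hlt : i + pvCountDots ("." :: rest) < i + ("." :: rest).length := by
            simp only [List.length_cons] at hlen ⊢
            generalize hg : pvCountDots ("." :: rest) = k at hlen ⊢
            omega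
          rw [pvScanB_cons _ _ _ _ _ hlt]
          by_cases hge : (pvCountDots ("." :: rest) : Int) ≥ c
          · simp [hge]
          · have hge' : ¬ (((0 : Nat) : Int) + (pvCountDots ("." :: rest) : Int) ≥ c) := by
              push_cast; omega
            rw [if_neg hge', if_neg hge]
            have hrl : rest2.length ≤ N := by
              have h5 := hl
              rw [hlen] at h5
              generalize hg : pvCountDots ("." :: rest) = k at h5 hk1
              omega
            rw [ih rest2 _ hrl]
            congr 1
            simp only [List.length_cons] at hlen ⊢
            generalize hg : pvCountDots ("." :: rest) = k at hlen ⊢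
            omega
      · -- non-dot head with an empty preceding run: both sides just step past it
        have h2 : pvLoopA c (s :: rest) i 0 = pvLoopA c rest (i + 1) 0 := by
          have hng : ¬ ((0 : Int) ≥ c) := by omega
          simp [pvLoopA, hs, hng]
        have h3 : pvRunsAt (s :: rest) i = pvRunsAt rest (i + 1) := by
          rw [pvRunsAt]; simp [hs]
        rw [h2, h3, ih rest (i + 1) (by simpa using Nat.lt_succ_iff.mp (by simpa using hl))]
        congr 1
        simp
        omega

-- ===== VERDICT (by name: the statement is the Claim_ definition above) =====
theorem find_suitable_dots_itr_spec : Claim_equal_find_suitable_dots_itr := by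
  intro arr c _
  unfold Spec_find_suitable_dots_itr find_suitable_dots_itr find_suitable_dots_itr_alt
  by_cases hc : c ≤ 0
  · simp [hc, pvLoopA_nonpos c hc arr 0 0]
  · have hc' : 0 < c := by omega
    simp only [hc, if_false]
    have := pvMain c hc' arr.length arr 0 (le_refl _)
    simpa [pvScanB] using this
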